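-- pv_equiv track=rewrite | github.com/Kozea/gibolt | gibolt.py | get_stones_by_step
-- ===== SOURCE A (Python) =====
-- def get_stones_by_step(all_stones, start, end, step):
--     current = start
--     result = []
--     while current < end:
--         stones = [
--             stone for stone in all_stones
--             if stone['due_on'] and current <= stone['due_on'] < current + step]
--         result.append((current, stones))
--         current += step
--     return result
-- ===== SOURCE B (Python) =====
-- def get_stones_by_step(all_stones, start, end, step):
--     if step <= 0 or start >= end:
--         return []
--     nwin = -((start - end) // step)  # = ceil((end - start) / step)
--     buckets = [[] for _ in range(nwin)]
--     for stone in all_stones: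
--         due = stone['due_on']
--         if due:
--             i = (due - start) // step
--             if 0 <= i < nwin:
--                 buckets[i].append(stone)
--     return [(start + i * step, b) for i, b in enumerate(buckets)]
-- ===== Notes on version B (the rewrite author's own statement) =====
-- stated objective: alternative
-- what changed: A rescans the whole stone list once per time window (O(windows*n)); B makes a single pass over the stones, assigning each to its bucket index by floor division, then emits the windows from the bucket list.
import Mathlib
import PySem

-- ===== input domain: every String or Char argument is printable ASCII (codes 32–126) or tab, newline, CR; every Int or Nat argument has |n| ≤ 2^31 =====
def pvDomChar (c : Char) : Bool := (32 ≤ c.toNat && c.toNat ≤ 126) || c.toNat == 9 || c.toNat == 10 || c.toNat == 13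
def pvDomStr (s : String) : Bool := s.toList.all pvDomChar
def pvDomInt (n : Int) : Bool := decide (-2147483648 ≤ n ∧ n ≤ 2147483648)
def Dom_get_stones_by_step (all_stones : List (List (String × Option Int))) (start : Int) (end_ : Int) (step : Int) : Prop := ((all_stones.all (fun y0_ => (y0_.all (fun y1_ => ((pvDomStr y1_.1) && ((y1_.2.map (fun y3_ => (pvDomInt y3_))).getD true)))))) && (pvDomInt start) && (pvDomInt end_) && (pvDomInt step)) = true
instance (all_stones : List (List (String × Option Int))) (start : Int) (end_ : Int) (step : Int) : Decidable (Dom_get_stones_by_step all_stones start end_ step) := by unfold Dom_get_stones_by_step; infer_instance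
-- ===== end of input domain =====

-- B replaces A's per-window rescan of all stones by a single pass assigning each stone
-- to its bucket via floor division (objective: alternative algorithm).

-- ===== PORT A =====
-- the list comprehension filtering the stones of one window
-- (Python truthiness of stone['due_on'] : Option Int — falsy iff None or 0)
def gsbsFilter (all_stones : List (List (String × Option Int))) (step current : Int) :
    List (List (String × Option Int)) :=
  all_stones.filter (fun stone =>
    match List.lookup "due_on" stone with
    | some (some d) => decide (¬ d = 0 ∧ current ≤ d ∧ d < current + step)
    | _ => false)

-- the while loop; the extra `0 < step` guard only makes the recursion total
-- (with step ≤ 0 and current < end_ Python diverges; excluded by Pre_)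
def gsbs_go (all_stones : List (List (String × Option Int))) (end_ step : Int)
    (current : Int) (result : List (Int × (List (List (String × Option Int))))) :
    List (Int × (List (List (String × Option Int)))) :=
  if _h : current < end_ ∧ 0 < step then
    gsbs_go all_stones end_ step (current + step)
      (result ++ [(current, gsbsFilter all_stones step current)])
  else result
termination_by (end_ - current).toNat
decreasing_by omega

def get_stones_by_step (all_stones : List (List (String × Option Int))) (start : Int) (end_ : Int) (step : Int) : List (Int × (List (List (String × Option Int)))) :=
  gsbs_go all_stones end_ step start []

-- ===== PORT B =====
-- one step of B's bucketing pass over the stones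
def gsbsBucket (start step nwin : Int) (bk : List (List (List (String × Option Int))))
    (stone : List (String × Option Int)) : List (List (List (String × Option Int))) :=
  match List.lookup "due_on" stone with
  | some (some d) =>
    if ¬ d = 0 then
      if 0 ≤ PySem.Int.floordiv (d - start) step ∧ PySem.Int.floordiv (d - start) step < nwin
      then bk.modify (PySem.Int.floordiv (d - start) step).toNat (· ++ [stone])
      else bk
    else bk
  | _ => bk

def get_stones_by_step_alt (all_stones : List (List (String × Option Int))) (start : Int) (end_ : Int) (step : Int) : List (Int × (List (List (String × Option Int)))) :=
  if step ≤ 0 ∨ end_ ≤ start then []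
  else
    let nwin : Int := -(PySem.Int.floordiv (start - end_) step)
    let buckets := all_stones.foldl (gsbsBucket start step nwin)
      (List.replicate nwin.toNat [])
    (PySem.List.enumerate buckets).map (fun ib => (start + ib.1 * step, ib.2))

-- ===== PRECONDITION & SPEC =====
-- Pre_ excludes, when at least one window exists (start < end_): step ≤ 0, where A's
-- while loop never terminates, and stone dicts missing the 'due_on' key, where A raises
-- KeyError; with start ≥ end_ A touches nothing and returns [], so nothing is excluded.
def Pre_get_stones_by_step (all_stones : List (List (String × Option Int))) (start : Int) (end_ : Int) (step : Int) : Prop :=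
  start < end_ → (0 < step ∧ ∀ s ∈ all_stones, (List.lookup "due_on" s).isSome)
instance (all_stones : List (List (String × Option Int))) (start : Int) (end_ : Int) (step : Int) : Decidable (Pre_get_stones_by_step all_stones start end_ step) := by unfold Pre_get_stones_by_step; infer_instance

def pvWitness_get_stones_by_step : (List (List (String × Option Int))) × Int × Int × Int :=
  ([[("due_on", some 3)], [("due_on", none)], [("due_on", some 0)]], 0, 4, 2)

def Spec_get_stones_by_step (all_stones : List (List (String × Option Int))) (start : Int) (end_ : Int) (step : Int) (out : List (Int × (List (List (String × Option Int))))) : Prop := out = get_stones_by_step_alt all_stones start end_ step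
instance (all_stones : List (List (String × Option Int))) (start : Int) (end_ : Int) (step : Int) (out : List (Int × (List (List (String × Option Int))))) : Decidable (Spec_get_stones_by_step all_stones start end_ step out) := by unfold Spec_get_stones_by_step; infer_instance

-- ===== CLAIM (what is proved, stated in full; the proofs are below) =====
def Claim_equal_get_stones_by_step : Prop := ∀ (all_stones : List (List (String × Option Int))) (start : Int) (end_ : Int) (step : Int), Dom_get_stones_by_step all_stones start end_ step → Pre_get_stones_by_step all_stones start end_ step → Spec_get_stones_by_step all_stones start end_ step (get_stones_by_step all_stones start end_ step)

-- ===== LEMMAS AND PROOFS =====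

-- A's loop produces one window per remaining step, each a full rescan of the stones
theorem gsbs_go_spec (all_stones : List (List (String × Option Int))) (end_ step : Int)
    (hstep : 0 < step) :
    ∀ (n : Nat) (current : Int) (result : List (Int × (List (List (String × Option Int))))),
      n = (-(PySem.Int.floordiv (current - end_) step)).toNat →
      gsbs_go all_stones end_ step current result =
        result ++ (List.range n).map
          (fun k : Nat => (current + (k : Int) * step,
            gsbsFilter all_stones step (current + (k : Int) * step))) := by
  intro n
  induction n with
  | zero =>
    intro current result hn
    have hm := (PySem.Int.floordiv_eq_iff_of_pos hstep).mp
      (rfl : PySem.Int.floordiv (current - end_) step = _)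
    have hge : ¬ current < end_ := by
      have h0 : 0 ≤ PySem.Int.floordiv (current - end_) step := by omega
      nlinarith [hm.1]
    rw [gsbs_go]
    simp [hge]
  | succ m ih =>
    intro current result hn
    set q := PySem.Int.floordiv (current - end_) step with hq
    have hm := (PySem.Int.floordiv_eq_iff_of_pos hstep).mp hq.symm
    have hqval : q = -((m : Int) + 1) := by omega
    have hlt : current < end_ := by
      have h2 : current - end_ < (q + 1) * step := hm.2
      have hq1 : q + 1 ≤ 0 := by omega
      nlinarith
    rw [gsbs_go]
    simp only [hlt, hstep, and_self, dif_pos]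
    rw [ih (current + step) _ ?_]
    · rw [List.range_succ_eq_map, List.map_cons, List.map_map]
      simp only [Nat.cast_zero, zero_mul, add_zero, List.append_assoc, List.singleton_append]
      congr 1
      congr 1
      apply List.map_congr_left
      intro k _
      simp only [Function.comp_apply, Nat.succ_eq_add_one]
      rw [show current + step + (k : Int) * step = current + (((k + 1 : Nat)) : Int) * step from by
        push_cast; ring]
    · have hnext : PySem.Int.floordiv (current + step - end_) step = -(m : Int) := by
        rw [PySem.Int.floordiv_eq_iff_of_pos hstep]
        constructor <;> nlinarith [hm.1, hm.2, hqval]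
      rw [hnext]; omega

theorem gsbsBucket_length (start step nwin : Int) (bk : List (List (List (String × Option Int))))
    (stone : List (String × Option Int)) :
    (gsbsBucket start step nwin bk stone).length = bk.length := by
  unfold gsbsBucket
  split <;> try rfl
  split_ifs <;> simp

theorem foldl_gsbsBucket_length (start step nwin : Int)
    (stones : List (List (String × Option Int))) :
    ∀ bk, (stones.foldl (gsbsBucket start step nwin) bk).length = bk.length := by
  induction stones with
  | nil => intro bk; rfl
  | cons s rest ih =>
    intro bk
    rw [List.foldl_cons, ih, gsbsBucket_length]

-- bucket i of the fold = old bucket i ++ the stones whose floor-division index is i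
theorem foldl_gsbsBucket_getD (start step nwin : Int)
    (stones : List (List (String × Option Int))) :
    ∀ (bk : List (List (List (String × Option Int)))) (i : Nat),
      (i : Int) < nwin → i < bk.length →
      (stones.foldl (gsbsBucket start step nwin) bk).getD i [] =
        bk.getD i [] ++ stones.filter (fun stone =>
          match List.lookup "due_on" stone with
          | some (some d) => decide (¬ d = 0 ∧ PySem.Int.floordiv (d - start) step = (i : Int))
          | _ => false) := by
  induction stones with
  | nil => intro bk i hi hib; simp
  | cons s rest ih =>
    intro bk i hi hib
    rw [List.foldl_cons, List.filter_cons]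
    cases hl : List.lookup "due_on" s with
    | none =>
      have hb : gsbsBucket start step nwin bk s = bk := by simp [gsbsBucket, hl]
      rw [hb, ih bk i hi hib]
      simp [hl]
    | some o =>
      cases o with
      | none =>
        have hb : gsbsBucket start step nwin bk s = bk := by simp [gsbsBucket, hl]
        rw [hb, ih bk i hi hib]
        simp [hl]
      | some d =>
        by_cases hd : d = 0
        · have hb : gsbsBucket start step nwin bk s = bk := by simp [gsbsBucket, hl, hd]
          rw [hb, ih bk i hi hib]
          simp [hl, hd]
        · by_cases hg : 0 ≤ PySem.Int.floordiv (d - start) step ∧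
              PySem.Int.floordiv (d - start) step < nwin
          · have hb : gsbsBucket start step nwin bk s =
                bk.modify (PySem.Int.floordiv (d - start) step).toNat (· ++ [s]) := by
              simp [gsbsBucket, hl, hd, hg]
            rw [hb, ih _ i hi (by simpa using hib)]
            have hmod : (bk.modify (PySem.Int.floordiv (d - start) step).toNat (· ++ [s])).getD i []
                = if (PySem.Int.floordiv (d - start) step).toNat = i
                  then bk.getD i [] ++ [s] else bk.getD i [] := by
              rw [List.getD_eq_getElem?_getD, List.getElem?_modify,
                List.getElem?_eq_getElem hib]
              split_ifs <;>
                simp [List.getD_eq_getElem?_getD, List.getElem?_eq_getElem hib]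
            rw [hmod]
            by_cases hji : PySem.Int.floordiv (d - start) step = (i : Int)
            · have htn : (PySem.Int.floordiv (d - start) step).toNat = i := by omega
              simp [htn, hl, hd, hji, List.append_assoc]
            · have htn : ¬ (PySem.Int.floordiv (d - start) step).toNat = i := by omega
              simp [htn, hl, hd, hji]
          · have hb : gsbsBucket start step nwin bk s = bk := by
              simp only [gsbsBucket, hl]
              rw [if_pos hd, if_neg hg]
            rw [hb, ih bk i hi hib]
            have hji : ¬ PySem.Int.floordiv (d - start) step = (i : Int) := by
              intro h; exact hg ⟨by omega, by omega⟩
            simp [hl, hd, hji]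

-- the two per-window predicates agree (window membership ↔ floor-division index)
theorem gsbsFilter_eq_bucketFilter (all_stones : List (List (String × Option Int)))
    (start step : Int) (hstep : 0 < step) (k : Nat) :
    gsbsFilter all_stones step (start + (k : Int) * step) =
      all_stones.filter (fun stone =>
        match List.lookup "due_on" stone with
        | some (some d) => decide (¬ d = 0 ∧ PySem.Int.floordiv (d - start) step = (k : Int))
        | _ => false) := by
  unfold gsbsFilter
  apply List.filter_congr
  intro s _
  cases hl : List.lookup "due_on" s with
  | none => simp
  | some o =>
    cases o with
    | none => simp
    | some d =>
      simp only [decide_eq_decide]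
      rw [PySem.Int.floordiv_eq_iff_of_pos hstep]
      constructor <;> intro h <;> refine ⟨h.1, ?_, ?_⟩ <;> nlinarith [h.2.1, h.2.2]

-- ===== VERDICT (by name: the statement is the Claim_ definition above) =====
theorem get_stones_by_step_spec : Claim_equal_get_stones_by_step := by
  intro all_stones start end_ step _hdom hpre
  unfold Spec_get_stones_by_step get_stones_by_step get_stones_by_step_alt
  by_cases hc : step ≤ 0 ∨ end_ ≤ start
  · have hne : ¬ start < end_ := by
      intro h
      rcases hc with h1 | h1
      · exact absurd (hpre h).1 (by omega)
      · omega
    rw [gsbs_go]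
    simp [hc, hne]
  · rcases not_or.mp hc with ⟨h1, h2⟩
    have hstep : 0 < step := by omega
    rw [if_neg hc]
    rw [gsbs_go_spec all_stones end_ step hstep
      (-(PySem.Int.floordiv (start - end_) step)).toNat start [] rfl]
    set nwin : Int := -(PySem.Int.floordiv (start - end_) step) with hnw
    set bk0 : List (List (List (String × Option Int))) := List.replicate nwin.toNat []
      with hbk0
    have hblen : (all_stones.foldl (gsbsBucket start step nwin) bk0).length = nwin.toNat := by
      rw [foldl_gsbsBucket_length]
      simp [hbk0]
    apply List.ext_getElem
    · simp only [List.nil_append, List.length_map, List.length_range,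
        PySem.List.length_enumerate]
      exact hblen.symm
    · intro k h1 h2
      simp only [List.nil_append] at h1 ⊢
      rw [List.getElem_map, List.getElem_map, PySem.List.getElem_enumerate]
      have hk : k < nwin.toNat := by simpa using h1
      rw [List.getElem_range]
      simp only [zero_add]
      refine Prod.ext rfl ?_
      have hget : (all_stones.foldl (gsbsBucket start step nwin) bk0)[k]'(by omega) =
          (all_stones.foldl (gsbsBucket start step nwin) bk0).getD k [] := by
        rw [List.getD_eq_getElem?_getD, List.getElem?_eq_getElem (by omega)]
        rfl
      rw [hget, foldl_gsbsBucket_getD start step nwin all_stones bk0 k (by omega)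
        (by simp [hbk0]; omega)]
      rw [gsbsFilter_eq_bucketFilter all_stones start step hstep k]
      simp [hbk0]
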